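-- pv_equiv track=rewrite | github.com/Pavel333333/DataBaseForDrWeb | db.py | del_elems_from_list_db
-- ===== SOURCE A (Python) =====
-- def del_elems_from_db(db: dict[str, str],
--                       history: dict[int, dict[str, list[str]]],
--                       number: int,
--                       ) -> dict[str, str]:
--     """Удаляет элементы из БД в сценарии с командой UNSET.
--     :param db: ДБ, из которой нужно удалить элементы.
--     :param history: История удалений элементов внутри транзакций в виде словаря,
--     где ключ это номер транзакции, а значение это словарь, в котором ведётся
--     лог действий по элементам БД: set и unset.
--     :param number: Номер транзакции (уровень вложенности).
--     :return: Базу после удаления элементов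
--     """
--     for k in history[number].keys():
--         if history[number][k][-1] == 'unset':
--             db.pop(k, None)
--     return db
--
-- def del_elems_from_list_db(list_db: list[dict[str, str]],
--                            history: dict[int, dict[str, list[str]]],
--                            number: int,
--                            ) -> list[dict[str, str]]:
--     """Удаляет элементы из списка транзакци в сценарии с командой UNSET.
--     :param list_db: Список временных БД до команды UNSET.
--     :param history: История удалений элементов внутри транзакций в виде словаря,
--     где ключ это номер транзакции, а значение это словарь, в котором ведётся
--     лог действий по элементам БД: set и unset.
--     :param number: Номер транзакции (уровень вложенности).
--     :return: Список транзакций после команды UNSET.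
--     """
--     for db_temp in list_db:
--         del_elems_from_db(db=db_temp,
--                          history=history,
--                          number=number,
--                          )
--     return list_db
-- ===== SOURCE B (Python) =====
-- def del_elems_from_list_db(list_db: list[dict[str, str]],
--                            history: dict[int, dict[str, list[str]]],
--                            number: int,
--                            ) -> list[dict[str, str]]:
--     """Build the set of keys whose last logged action is 'unset' once; then
--     REBUILD each DB by filtering its own items (keep survivors) instead of
--     popping keys during a scan of the history entry.  Mutates each dict in
--     place (clear+update) and returns the same list object, like A."""
--     if not list_db:
--         return list_db
--     unset = {k for k, log in history[number].items() if log[-1] == 'unset'}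
--     for db_temp in list_db:
--         kept = {k: v for k, v in db_temp.items() if k not in unset}
--         db_temp.clear()
--         db_temp.update(kept)
--     return list_db
-- ===== Notes on version B (the rewrite author's own statement) =====
-- stated objective: alternative
-- what changed: B precomputes once the set of keys whose last logged action is 'unset', then rebuilds each DB by filtering the DB's own items against that set (complement filter, clear+update), instead of A's per-DB rescan of history[number] with a last-element test and a pop per history key; an empty list_db returns early without touching history, as A never reads it then.
import Mathlib
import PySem

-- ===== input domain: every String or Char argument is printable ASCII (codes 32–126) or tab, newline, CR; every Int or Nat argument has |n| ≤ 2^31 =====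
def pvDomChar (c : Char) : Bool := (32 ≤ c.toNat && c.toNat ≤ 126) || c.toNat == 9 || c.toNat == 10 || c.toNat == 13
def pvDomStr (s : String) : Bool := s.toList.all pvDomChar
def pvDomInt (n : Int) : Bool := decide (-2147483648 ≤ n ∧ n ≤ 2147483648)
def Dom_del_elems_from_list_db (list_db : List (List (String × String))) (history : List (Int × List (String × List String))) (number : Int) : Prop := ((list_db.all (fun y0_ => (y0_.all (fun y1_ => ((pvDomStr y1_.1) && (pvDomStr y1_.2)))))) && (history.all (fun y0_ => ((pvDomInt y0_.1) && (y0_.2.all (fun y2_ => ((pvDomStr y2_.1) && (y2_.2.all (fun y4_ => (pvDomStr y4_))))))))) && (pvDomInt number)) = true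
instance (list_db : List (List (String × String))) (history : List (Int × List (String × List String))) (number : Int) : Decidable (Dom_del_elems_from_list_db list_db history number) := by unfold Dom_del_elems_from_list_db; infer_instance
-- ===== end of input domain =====

-- B builds the set of 'unset' keys once and REBUILDS each DB by filtering its own
-- items against that set, instead of A's per-DB rescan of history[number] with a pop
-- per key (objective: alternative decomposition); both Pythons mutate the dicts in
-- list_db in place and return the same list object — the equivalence proved here is
-- about the return value.

-- ===== PORT A =====
-- Python dicts modelled with PySem.Dict built from the association lists.
def pvHist (history : List (Int × List (String × List String))) : PySem.Dict Int (PySem.Dict String (List String)) :=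
  PySem.Dict.ofList (history.map (fun p => (p.1, PySem.Dict.ofList p.2)))

-- helper del_elems_from_db of A: for k in history[number].keys(): if history[number][k][-1] == 'unset': db.pop(k, None)
def del_elems_from_db (db : PySem.Dict String String) (history : List (Int × List (String × List String))) (number : Int) : PySem.Dict String String :=
  let h := (pvHist history).getD number PySem.Dict.empty
  h.keys.foldl (fun d k =>
    match PySem.List.pyGet? (h.getD k []) (-1) with
    | some a => if a = "unset" then d.erase k else d
    | none => d) db

def del_elems_from_list_db (list_db : List (List (String × String))) (history : List (Int × List (String × List String))) (number : Int) : List (List (String × String)) :=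
  list_db.map (fun db => (del_elems_from_db (PySem.Dict.ofList db) history number).items)

-- ===== PORT B =====
-- unset = {k for k, log in history[number].items() if log[-1] == 'unset'};
-- each DB is rebuilt as the dict of its items whose key is not in that set.
def del_elems_from_list_db_alt (list_db : List (List (String × String))) (history : List (Int × List (String × List String))) (number : Int) : List (List (String × String)) :=
  if list_db.isEmpty then list_db
  else
    let h := (pvHist history).getD number PySem.Dict.empty
    let unset : PySem.Set String :=
      PySem.Set.ofList ((h.items.filter (fun p => PySem.List.pyGet? p.2 (-1) == some "unset")).map Prod.fst)
    list_db.map (fun db => (PySem.Dict.ofList db).items.filter (fun p => !(unset.contains p.1)))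

-- ===== PRECONDITION & SPEC =====
-- Pre_ excludes exactly the inputs where Python A raises: with a nonempty list_db,
-- a number missing from history (KeyError) or an empty action log under history[number]
-- (IndexError from log[-1]).
def Pre_del_elems_from_list_db (list_db : List (List (String × String))) (history : List (Int × List (String × List String))) (number : Int) : Prop :=
  list_db = [] ∨ ((pvHist history).contains number = true ∧ ∀ p ∈ ((pvHist history).getD number PySem.Dict.empty).items, p.2 ≠ [])
instance (list_db : List (List (String × String))) (history : List (Int × List (String × List String))) (number : Int) : Decidable (Pre_del_elems_from_list_db list_db history number) := by unfold Pre_del_elems_from_list_db; infer_instance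
def pvWitness_del_elems_from_list_db : (List (List (String × String))) × (List (Int × List (String × List String))) × Int :=
  ([[("a", "1"), ("b", "2")]], [(0, [("a", ["set", "unset"]), ("c", ["unset"])])], 0)

def Spec_del_elems_from_list_db (list_db : List (List (String × String))) (history : List (Int × List (String × List String))) (number : Int) (out : List (List (String × String))) : Prop := out = del_elems_from_list_db_alt list_db history number
instance (list_db : List (List (String × String))) (history : List (Int × List (String × List String))) (number : Int) (out : List (List (String × String))) : Decidable (Spec_del_elems_from_list_db list_db history number out) := by unfold Spec_del_elems_from_list_db; infer_instance

-- ===== CLAIM (what is proved, stated in full; the proofs are below) =====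
def Claim_equal_del_elems_from_list_db : Prop := ∀ (list_db : List (List (String × String))) (history : List (Int × List (String × List String))) (number : Int), Dom_del_elems_from_list_db list_db history number → Pre_del_elems_from_list_db list_db history number → Spec_del_elems_from_list_db list_db history number (del_elems_from_list_db list_db history number)

-- ===== LEMMAS AND PROOFS =====

-- Folding A's lookup-and-test body over the keys of an association list equals folding
-- plain erase over the keys kept by the 'unset' filter, provided each key looks up its paired log.
theorem foldl_keys_eq_foldl_filter (h : PySem.Dict String (List String))
    (l : List (String × List String)) (hget : ∀ p ∈ l, h.getD p.1 [] = p.2)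
    (db : PySem.Dict String String) :
    (l.map Prod.fst).foldl (fun d k =>
      match PySem.List.pyGet? (h.getD k []) (-1) with
      | some a => if a = "unset" then d.erase k else d
      | none => d) db
    = ((l.filter (fun p => PySem.List.pyGet? p.2 (-1) == some "unset")).map Prod.fst).foldl
        (fun d k => d.erase k) db := by
  induction l generalizing db with
  | nil => rfl
  | cons p l ih =>
    have hp : h.getD p.1 [] = p.2 := hget p (by simp)
    have hrest : ∀ q ∈ l, h.getD q.1 [] = q.2 := fun q hq => hget q (by simp [hq])
    simp only [List.map_cons, List.foldl_cons, List.filter_cons, hp]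
    cases hv : PySem.List.pyGet? p.2 (-1) with
    | none => simpa [hv] using ih hrest db
    | some a =>
      by_cases ha : a = "unset"
      · subst ha; simpa [hv] using ih hrest (db.erase p.1)
      · simpa [hv, ha, Ne.symm ha] using ih hrest db

-- erasing one key filters the item list by that key
theorem erase_items (d : PySem.Dict String String) (k : String) :
    (d.erase k).items = d.items.filter (fun p => !(p.1 == k)) := by
  cases d with | mk l => simp [PySem.Dict.erase]

-- folding erase over a list of keys filters the items by non-membership in that list
theorem foldl_erase_items (ks : List String) (d : PySem.Dict String String) :
    (ks.foldl (fun d k => d.erase k) d).items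
    = d.items.filter (fun p => !(ks.contains p.1)) := by
  induction ks generalizing d with
  | nil => simp
  | cons k ks ih =>
    simp only [List.foldl_cons, ih, erase_items, List.filter_filter]
    apply List.filter_congr
    intro p _
    by_cases h : p.1 = k <;> simp [h, Bool.and_comm]

-- membership in Set.ofList agrees with membership in the underlying list
theorem set_ofList_contains (l : List String) (x : String) :
    (PySem.Set.ofList l).contains x = l.contains x := by
  simp only [PySem.Set.contains]
  rw [List.contains_eq_mem, List.contains_eq_mem]
  exact decide_eq_decide.2 (PySem.Set.mem_ofList l x)

-- every item of a dict built by a fold of inserts comes from the start dict or the list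
theorem mem_items_foldl_insert {κ ν : Type} [BEq κ] [LawfulBEq κ]
    (l : List (κ × ν)) (d : PySem.Dict κ ν) (p : κ × ν)
    (hp : p ∈ (l.foldl (fun d q => d.insert q.1 q.2) d).items) : p ∈ d.items ∨ p ∈ l := by
  induction l generalizing d with
  | nil => exact Or.inl hp
  | cons q l ih =>
    rcases ih _ hp with h | h
    · rcases (PySem.Dict.mem_items_insert _ _ _ _).1 h with h' | h'
      · right; simp [h']
      · exact Or.inl h'.1
    · right; simp [h]

theorem nodup_keys_hist (history : List (Int × List (String × List String))) (number : Int) :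
    ((pvHist history).getD number PySem.Dict.empty).keys.Nodup := by
  cases hg : (pvHist history).get? number with
  | none => rw [PySem.Dict.getD_of_get?_eq_none _ _ hg]; simp
  | some d =>
    rw [PySem.Dict.getD_of_get?_eq_some _ _ hg]
    have hmem := PySem.Dict.mem_items_of_get?_eq_some _ hg
    have : (number, d) ∈ (PySem.Dict.empty : PySem.Dict Int (PySem.Dict String (List String))).items ∨
        (number, d) ∈ history.map (fun p => (p.1, PySem.Dict.ofList p.2)) :=
      mem_items_foldl_insert _ _ _ hmem
    rcases this with h | h
    · simp [PySem.Dict.empty] at h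
    · rcases List.mem_map.1 h with ⟨q, _, hq⟩
      have : d = PySem.Dict.ofList q.2 := (congrArg Prod.snd hq).symm
      rw [this]; exact PySem.Dict.nodup_keys_ofList _

-- A's per-DB pass is a fold of erase over the 'unset'-filtered keys of history[number]
theorem per_db_dict (history : List (Int × List (String × List String))) (number : Int)
    (db : PySem.Dict String String) :
    del_elems_from_db db history number
    = ((((pvHist history).getD number PySem.Dict.empty).items.filter
          (fun p => PySem.List.pyGet? p.2 (-1) == some "unset")).map Prod.fst).foldl
        (fun d k => d.erase k) db := by
  have hnd := nodup_keys_hist history number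
  unfold del_elems_from_db
  exact foldl_keys_eq_foldl_filter _ _
    (fun p hp => PySem.Dict.getD_of_mem_items _ hp hnd _) db

-- A's per-DB pass equals B's filter of the DB's items against the precomputed key set
theorem per_db_eq (history : List (Int × List (String × List String))) (number : Int)
    (db : PySem.Dict String String) :
    (del_elems_from_db db history number).items
    = db.items.filter (fun p =>
        !((PySem.Set.ofList ((((pvHist history).getD number PySem.Dict.empty).items.filter
            (fun q => PySem.List.pyGet? q.2 (-1) == some "unset")).map Prod.fst)).contains p.1)) := by
  rw [per_db_dict, foldl_erase_items]
  exact List.filter_congr (fun p _ => by rw [set_ofList_contains])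

-- ===== VERDICT (by name: the statement is the Claim_ definition above) =====
theorem del_elems_from_list_db_spec : Claim_equal_del_elems_from_list_db := by
  intro list_db history number _ _
  unfold Spec_del_elems_from_list_db del_elems_from_list_db del_elems_from_list_db_alt
  cases list_db with
  | nil => rfl
  | cons db rest =>
    simp only [List.isEmpty_cons, Bool.false_eq_true, if_false]
    exact List.map_congr_left (fun x _ => by rw [per_db_eq])
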